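-- pv_equiv track=rewrite | github.com/MinooSdpr/Advanced-python | EXTRA/Amirza.py | find_exact_match_words
-- ===== SOURCE A (Python) =====
-- from collections import Counter
--
-- def find_exact_match_words(words, letters,length):
--     letter_count = Counter(letters)
--     matching_words = []
--
--     for word in words:
--         word_count = Counter(word)
--         if not all(w in letters for w in word):
--             continue
--         if len(word) == length and all(letter_count[w]>=word_count[w] for w in word):
--             matching_words.append(word)
--
--     return matching_words
-- ===== SOURCE B (Python) =====
-- def find_exact_match_words(words, letters, length):
--     # Sort the letter pool once; a word is spellable iff its sorted characters
--     # form a subsequence of the sorted pool (two-pointer merge scan).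
--     pool = sorted(letters)
--     matching_words = []
--     for word in words:
--         if len(word) != length:
--             continue
--         i = 0
--         ok = True
--         for ch in sorted(word):
--             while i < len(pool) and pool[i] < ch:
--                 i += 1
--             if i == len(pool) or pool[i] != ch:
--                 ok = False
--                 break
--             i += 1
--         if ok:
--             matching_words.append(word)
--     return matching_words
-- ===== Notes on version B (the rewrite author's own statement) =====
-- stated objective: faster
-- what changed: Replaces A's per-word Counter build, per-character substring membership prefilter and full count comparison with a sort-based algorithm: sort the letter pool once, and test each length-matching word by a two-pointer merge scan checking that the word's sorted characters are a subsequence of the sorted pool.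
import Mathlib
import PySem

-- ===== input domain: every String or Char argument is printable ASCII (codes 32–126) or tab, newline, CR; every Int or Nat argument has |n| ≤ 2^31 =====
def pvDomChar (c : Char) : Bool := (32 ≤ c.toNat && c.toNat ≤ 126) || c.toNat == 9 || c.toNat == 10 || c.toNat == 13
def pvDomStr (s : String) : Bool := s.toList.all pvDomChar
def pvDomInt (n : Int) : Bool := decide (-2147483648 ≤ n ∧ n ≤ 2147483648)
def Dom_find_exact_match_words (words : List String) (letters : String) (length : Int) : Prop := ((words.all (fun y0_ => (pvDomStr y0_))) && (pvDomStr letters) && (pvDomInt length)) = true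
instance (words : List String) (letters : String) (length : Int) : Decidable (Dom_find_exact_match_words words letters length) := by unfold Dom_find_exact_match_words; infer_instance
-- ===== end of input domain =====

-- B replaces A's per-word Counter + per-char substring-membership prefilter + full count
-- comparison by a sort-based algorithm: sort the pool once and test each word by a
-- two-pointer merge scan of its sorted characters against the sorted pool
-- (objective: faster, measured).

-- ===== PORT A =====
def find_exact_match_words (words : List String) (letters : String) (length : Int) : List String :=
  let letter_count := PySem.Dict.counter letters.toList
  words.foldl (fun matching_words word =>
    let word_count := PySem.Dict.counter word.toList
    if ¬ (word.toList.all (fun w => PySem.Chars.isIn [w] letters.toList)) then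
      matching_words
    else if PySem.Str.len word = length ∧
        (word.toList.all (fun w => decide (letter_count.getD w 0 ≥ word_count.getD w 0))) then
      matching_words ++ [word]
    else
      matching_words) []

-- ===== PORT B =====
-- two-pointer merge scan: the inner `for ch in sorted(word)` with its `while` skip;
-- first list = remaining sorted word chars, second = remaining pool suffix from index i
def pvMergeSub : List Char → List Char → Bool
  | [], _ => true
  | _ :: _, [] => false
  | c :: cs, p :: ps =>
      if p < c then pvMergeSub (c :: cs) ps        -- while pool[i] < ch: i += 1
      else if p = c then pvMergeSub cs ps          -- matched, advance both
      else false                                   -- pool[i] > ch: fail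
  termination_by cs ps => cs.length + ps.length

def find_exact_match_words_alt (words : List String) (letters : String) (length : Int) : List String :=
  let pool := PySem.List.sorted letters.toList (fun x => x) false
  words.foldl (fun matching_words word =>
    if PySem.Str.len word ≠ length then matching_words
    else if pvMergeSub (PySem.List.sorted word.toList (fun x => x) false) pool then
      matching_words ++ [word]
    else matching_words) []

-- ===== PRECONDITION & SPEC =====
def Spec_find_exact_match_words (words : List String) (letters : String) (length : Int) (out : List String) : Prop := out = find_exact_match_words_alt words letters length
instance (words : List String) (letters : String) (length : Int) (out : List String) : Decidable (Spec_find_exact_match_words words letters length out) := by unfold Spec_find_exact_match_words; infer_instance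

-- ===== CLAIM (what is proved, stated in full; the proofs are below) =====
def Claim_equal_find_exact_match_words : Prop := ∀ (words : List String) (letters : String) (length : Int), Dom_find_exact_match_words words letters length → Spec_find_exact_match_words words letters length (find_exact_match_words words letters length)

-- ===== LEMMAS AND PROOFS =====

-- singleton substring test is membership
theorem pv_isIn_singleton (c : Char) (l : List Char) :
    PySem.Chars.isIn [c] l = true ↔ c ∈ l := by
  rw [PySem.Chars.isIn_iff_infix]
  constructor
  · intro h
    exact (List.singleton_sublist.mp h.sublist)
  · intro h
    obtain ⟨s, t, rfl⟩ := List.append_of_mem h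
    exact ⟨s, t, by simp⟩

-- merge scan on sorted lists succeeds iff every character's multiplicity fits
theorem pvMergeSub_iff (pool ws : List Char)
    (hw : ws.Pairwise (· ≤ ·)) (hp : pool.Pairwise (· ≤ ·)) :
    pvMergeSub ws pool = true ↔ ∀ c, ws.count c ≤ pool.count c := by
  induction pool generalizing ws with
  | nil =>
    cases ws with
    | nil => simp [pvMergeSub]
    | cons c cs =>
      simp only [pvMergeSub]
      apply iff_of_false (by simp)
      intro h
      have := h c
      simp at this
  | cons p ps ih =>
    cases ws with
    | nil =>
      simp [pvMergeSub]
    | cons c cs =>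
      rcases List.pairwise_cons.mp hw with ⟨hwc, hw'⟩
      rcases List.pairwise_cons.mp hp with ⟨hpp, hp'⟩
      by_cases h1 : p < c
      · -- skip pool head; p occurs nowhere in c :: cs
        have hnp : (c :: cs).count p = 0 := by
          apply List.count_eq_zero_of_not_mem
          intro hm
          rcases List.mem_cons.mp hm with rfl | hm
          · exact absurd h1 (lt_irrefl _)
          · exact absurd (lt_of_lt_of_le h1 (hwc _ hm)) (lt_irrefl _)
        rw [show pvMergeSub (c :: cs) (p :: ps) = pvMergeSub (c :: cs) ps by
          simp [pvMergeSub, h1]]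
        rw [ih (c :: cs) hw hp']
        constructor
        · intro h x
          have := h x
          simp only [List.count_cons] at this ⊢
          omega
        · intro h x
          by_cases hx : p = x
          · subst hx; rw [hnp]; exact Nat.zero_le _
          · have := h x
            simp only [List.count_cons] at this ⊢
            simp only [hx, if_false, Bool.false_eq_true, beq_iff_eq] at this ⊢
            omega
      · by_cases h2 : p = c
        · -- matched heads
          subst h2
          rw [show pvMergeSub (p :: cs) (p :: ps) = pvMergeSub cs ps by
            simp [pvMergeSub, h1]]
          rw [ih cs hw' hp']
          constructor
          · intro h x
            have := h x
            simp only [List.count_cons] at this ⊢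
            omega
          · intro h x
            have := h x
            simp only [List.count_cons] at this ⊢
            omega
        · -- pool head is greater: c is absent from the pool
          have hc : c < p := lt_of_le_of_ne (le_of_not_gt h1) (Ne.symm h2)
          rw [show pvMergeSub (c :: cs) (p :: ps) = false by
            simp [pvMergeSub, h1, h2]]
          apply iff_of_false (by simp)
          intro h
          have hcp : (p :: ps).count c = 0 := by
            apply List.count_eq_zero_of_not_mem
            intro hm
            rcases List.mem_cons.mp hm with rfl | hm
            · exact absurd hc (lt_irrefl _)
            · exact absurd (lt_of_lt_of_le hc (hpp _ hm)) (lt_irrefl _)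
          have := h c
          rw [hcp] at this
          simp at this

-- spellability via the merge scan on sorted copies equals the count condition
theorem pvMergeSub_sorted_iff (letters ws : List Char) :
    pvMergeSub (PySem.List.sorted ws (fun x => x) false)
        (PySem.List.sorted letters (fun x => x) false) = true
      ↔ ∀ c, ws.count c ≤ letters.count c := by
  rw [pvMergeSub_iff _ _ (PySem.List.sorted_pairwise ws (fun x => x))
      (PySem.List.sorted_pairwise letters (fun x => x))]
  constructor
  · intro h c
    have := h c
    rwa [(PySem.List.sorted_perm ws (fun x => x) false).count_eq,
      (PySem.List.sorted_perm letters (fun x => x) false).count_eq] at this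
  · intro h c
    rw [(PySem.List.sorted_perm ws (fun x => x) false).count_eq,
      (PySem.List.sorted_perm letters (fun x => x) false).count_eq]
    exact h c

-- A's foldl-append loop is a filter
theorem pv_foldA (letters : String) (length : Int) (words : List String) (acc : List String) :
    words.foldl (fun matching_words word =>
      let word_count := PySem.Dict.counter word.toList
      if ¬ (word.toList.all (fun w => PySem.Chars.isIn [w] letters.toList)) then
        matching_words
      else if PySem.Str.len word = length ∧
          (word.toList.all (fun w => decide ((PySem.Dict.counter letters.toList).getD w 0 ≥ word_count.getD w 0))) then
        matching_words ++ [word]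
      else
        matching_words) acc
    = acc ++ words.filter (fun word =>
        (word.toList.all (fun w => PySem.Chars.isIn [w] letters.toList)) &&
        decide (PySem.Str.len word = length ∧
          (word.toList.all (fun w => decide ((PySem.Dict.counter letters.toList).getD w 0 ≥ (PySem.Dict.counter word.toList).getD w 0))))) := by
  induction words generalizing acc with
  | nil => simp
  | cons w ws ih =>
    simp only [List.foldl_cons, List.filter_cons]
    by_cases h1 : (w.toList.all fun c => PySem.Chars.isIn [c] letters.toList) = true
    · by_cases h2 : PySem.Str.len w = length ∧
          ((w.toList.all fun c => decide ((PySem.Dict.counter letters.toList).getD c 0 ≥ (PySem.Dict.counter w.toList).getD c 0)) = true)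
      · rw [if_neg (by simp [h1]), if_pos h2, ih, h1, decide_eq_true h2]
        simp
      · rw [if_neg (by simp [h1]), if_neg h2, ih, h1, decide_eq_false h2]
        simp
    · rw [if_pos h1, ih]
      rw [Bool.not_eq_true] at h1
      rw [h1]
      simp

-- B's foldl-append loop is a filter
theorem pv_foldB (letters : String) (length : Int) (words : List String) (acc : List String) :
    words.foldl (fun matching_words word =>
      if PySem.Str.len word ≠ length then matching_words
      else if pvMergeSub (PySem.List.sorted word.toList (fun x => x) false)
          (PySem.List.sorted letters.toList (fun x => x) false) then
        matching_words ++ [word]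
      else matching_words) acc
    = acc ++ words.filter (fun word =>
        (PySem.Str.len word == length) &&
        pvMergeSub (PySem.List.sorted word.toList (fun x => x) false)
          (PySem.List.sorted letters.toList (fun x => x) false)) := by
  induction words generalizing acc with
  | nil => simp
  | cons w ws ih =>
    simp only [List.foldl_cons, List.filter_cons]
    by_cases h1 : PySem.Str.len w = length
    all_goals simp only [PySem.Str.len, String.length_toList] at h1
    · by_cases h2 : pvMergeSub (PySem.List.sorted w.toList (fun x => x) false)
          (PySem.List.sorted letters.toList (fun x => x) false) = true
      · rw [if_neg (by simp [h1]), if_pos h2, ih]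
        simp [PySem.Str.len, h1, h2]
      · rw [if_neg (by simp [h1]), ih]
        rw [Bool.not_eq_true] at h2
        simp [PySem.Str.len, h1, h2]
    · rw [if_pos (by simp [h1]), ih]
      simp [PySem.Str.len, h1]

-- the two per-word predicates agree
theorem pv_pred_eq (letters : String) (length : Int) (w : String) :
    ((w.toList.all (fun c => PySem.Chars.isIn [c] letters.toList)) &&
      decide (PySem.Str.len w = length ∧
        (w.toList.all (fun c => decide ((PySem.Dict.counter letters.toList).getD c 0 ≥ (PySem.Dict.counter w.toList).getD c 0)))))
    = ((PySem.Str.len w == length) &&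
        pvMergeSub (PySem.List.sorted w.toList (fun x => x) false)
          (PySem.List.sorted letters.toList (fun x => x) false)) := by
  rcases hsp : pvMergeSub (PySem.List.sorted w.toList (fun x => x) false)
      (PySem.List.sorted letters.toList (fun x => x) false) with _ | _
  · -- merge fails: some character's multiplicity exceeds the pool, so A's count test fails too
    have hns : ¬ ∀ c, w.toList.count c ≤ letters.toList.count c := by
      intro hall
      have := (pvMergeSub_sorted_iff letters.toList w.toList).mpr hall
      rw [hsp] at this
      cases this
    rw [Bool.and_false, Bool.and_eq_false_iff]
    right
    rw [decide_eq_false_iff_not]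
    rintro ⟨hlen, hall⟩
    apply hns
    intro c
    by_cases hc : c ∈ w.toList
    · have h1 := List.all_eq_true.mp hall c hc
      rw [decide_eq_true_eq, ge_iff_le, PySem.Dict.getD_counter, PySem.Dict.getD_counter] at h1
      exact_mod_cast h1
    · rw [List.count_eq_zero_of_not_mem hc]; omega
  · -- merge succeeds: counts fit, hence every character is in letters
    have hsp' := (pvMergeSub_sorted_iff letters.toList w.toList).mp hsp
    have hmem : ∀ c ∈ w.toList, c ∈ letters.toList := by
      intro c hc
      have h1 := hsp' c
      have h2 : 0 < w.toList.count c := List.count_pos_iff.mpr hc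
      exact List.count_pos_iff.mp (by omega)
    have h1 : (w.toList.all (fun c => PySem.Chars.isIn [c] letters.toList)) = true := by
      rw [List.all_eq_true]
      intro c hc
      exact (pv_isIn_singleton c letters.toList).mpr (hmem c hc)
    have h2 : (w.toList.all (fun c => decide ((PySem.Dict.counter letters.toList).getD c 0 ≥ (PySem.Dict.counter w.toList).getD c 0))) = true := by
      rw [List.all_eq_true]
      intro c hc
      simp only [PySem.Dict.getD_counter, decide_eq_true_eq, ge_iff_le]
      exact_mod_cast hsp' c
    rw [h1, h2, Bool.and_true, Bool.true_and, beq_eq_decide]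
    simp

-- ===== VERDICT (by name: the statement is the Claim_ definition above) =====
theorem find_exact_match_words_spec : Claim_equal_find_exact_match_words := by
  intro words letters length _
  unfold Spec_find_exact_match_words find_exact_match_words find_exact_match_words_alt
  rw [pv_foldA, pv_foldB]
  simp only [List.nil_append]
  exact List.filter_congr (fun w _ => pv_pred_eq letters length w)
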